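-- pv_equiv track=rewrite | github.com/uclamii/equiboots_docs | src/equiboots/plots.py | generate_alpha_labels
-- ===== SOURCE A (Python) =====
-- from typing import Dict, List, Optional, Union, Tuple, Set, Callable
--
-- def generate_alpha_labels(n: int) -> List[str]:
--     """Generate alphabetical labels for n groups (A, B, ..., Z, AA, AB, ...)."""
--     labels = []
--     for i in range(n):
--         if i < 26:
--             # Single letter: A to Z
--             labels.append(chr(65 + i))
--         else:
--             # Double letter: AA, AB, ..., AZ, BA, BB, ...
--             first = chr(65 + (i // 26 - 1))  # First letter (A, B, ...)
--             second = chr(65 + (i % 26))  # Second letter (A, B, ...)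
--             labels.append(first + second)
--     return labels
-- ===== SOURCE B (Python) =====
-- from typing import List
--
-- def generate_alpha_labels(n: int) -> List[str]:
--     """Generate alphabetical labels for n groups (A, B, ..., Z, AA, AB, ...)."""
--     labels = [chr(65 + i) for i in range(min(n, 26))]
--     total = len(labels)
--     o = 0
--     while total < n:
--         for s in range(26):
--             labels.append(chr(65 + o) + chr(65 + s))
--             total += 1
--             if total == n:
--                 break
--         o += 1
--     return labels
-- ===== Notes on version B (the rewrite author's own statement) =====
-- stated objective: alternative
-- what changed: A computes each label's letters from the index i via i//26-1 and i%26 inside one loop; B first emits the single letters with a comprehension, then runs a nested counter loop (outer letter counter o, inner second-letter loop with a break when the running total reaches n), so no division or modulus is performed.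
import Mathlib
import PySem

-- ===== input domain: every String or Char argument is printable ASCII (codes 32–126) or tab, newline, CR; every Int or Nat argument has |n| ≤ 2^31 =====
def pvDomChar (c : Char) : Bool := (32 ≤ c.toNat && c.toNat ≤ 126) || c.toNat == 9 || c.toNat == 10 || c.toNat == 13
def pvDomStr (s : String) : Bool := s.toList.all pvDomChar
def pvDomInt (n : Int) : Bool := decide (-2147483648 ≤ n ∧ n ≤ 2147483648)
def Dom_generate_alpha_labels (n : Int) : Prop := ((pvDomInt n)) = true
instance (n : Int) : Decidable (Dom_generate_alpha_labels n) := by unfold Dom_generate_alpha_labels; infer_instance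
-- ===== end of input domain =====

-- B replaces A's per-index division/modulus arithmetic by a nested counter loop (outer letter counter,
-- inner second-letter loop with a break when the running total reaches n): alternative decomposition, same cost.
-- Python's chr is ported by hand as Char.ofNat; it is exact for the code points reachable under Pre_ (all below U+D800).

-- ===== PORT A =====
def generate_alpha_labels (n : Int) : List String :=
  (PySem.List.pyRange 0 n 1).foldl
    (fun labels i =>
      if i < 26 then
        labels ++ [String.ofList [Char.ofNat (65 + i).toNat]]
      else
        let first := String.ofList [Char.ofNat (65 + (PySem.Int.floordiv i 26 - 1)).toNat]
        let second := String.ofList [Char.ofNat (65 + PySem.Int.mod i 26).toNat]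
        labels ++ [first ++ second]) []

-- ===== PORT B =====
-- inner 'for s in range(26)' loop of Source B, with its 'break' (early return) when total reaches n
def pvB_inner (n o : Int) : List Int → List String → Int → List String × Int
  | [], labels, total => (labels, total)
  | s :: rest, labels, total =>
      let labels' := labels ++ [String.ofList [Char.ofNat (65 + o).toNat] ++ String.ofList [Char.ofNat (65 + s).toNat]]
      let total' := total + 1
      if total' = n then (labels', total')
      else pvB_inner n o rest labels' total'

-- termination fact for the outer while loop: the inner loop strictly increases total
theorem pvB_inner_total_le (n o : Int) : ∀ (ss : List Int) (labels : List String) (total : Int),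
    total ≤ (pvB_inner n o ss labels total).2 := by
  intro ss
  induction ss with
  | nil => intro labels total; simp [pvB_inner]
  | cons s rest ih =>
      intro labels total
      simp only [pvB_inner]
      split
      · simp
      · have := ih (labels ++ [String.ofList [Char.ofNat (65 + o).toNat] ++ String.ofList [Char.ofNat (65 + s).toNat]]) (total + 1)
        omega

theorem pvB_inner_total_lt (n o s : Int) (rest : List Int) (labels : List String) (total : Int) :
    total < (pvB_inner n o (s :: rest) labels total).2 := by
  simp only [pvB_inner]
  split
  · simp
  · have := pvB_inner_total_le n o rest (labels ++ [String.ofList [Char.ofNat (65 + o).toNat] ++ String.ofList [Char.ofNat (65 + s).toNat]]) (total + 1)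
    omega

-- outer 'while total < n' loop of Source B
def pvB_outer (n : Int) (labels : List String) (total o : Int) : List String :=
  if total < n then
    let r := pvB_inner n o (PySem.List.pyRange 0 26 1) labels total
    pvB_outer n r.1 r.2 (o + 1)
  else labels
termination_by (n - total).toNat
decreasing_by
  have h1 : total < (pvB_inner n o (PySem.List.pyRange 0 26 1) labels total).2 := by
    rw [PySem.List.pyRange_one_cons (by norm_num)]
    exact pvB_inner_total_lt n o 0 _ labels total
  omega

def generate_alpha_labels_alt (n : Int) : List String :=
  let labels := (PySem.List.pyRange 0 (min n 26) 1).map (fun i => String.ofList [Char.ofNat (65 + i).toNat])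
  pvB_outer n labels (labels.length : Int) 0

-- ===== PRECONDITION & SPEC =====
-- Pre_ excludes n above the stated bound, on which A still returns: past it the returned list contains
-- labels holding lone surrogate code points (chr of 0xD800 and up), which are not representable as Lean
-- Strings/Chars; still further out chr() goes past the Unicode range and A raises ValueError.
def Pre_generate_alpha_labels (n : Int) : Prop := n ≤ 1436032
instance (n : Int) : Decidable (Pre_generate_alpha_labels n) := by unfold Pre_generate_alpha_labels; infer_instance
def pvWitness_generate_alpha_labels : Int := (300)
def Spec_generate_alpha_labels (n : Int) (out : List String) : Prop := out = generate_alpha_labels_alt n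
instance (n : Int) (out : List String) : Decidable (Spec_generate_alpha_labels n out) := by unfold Spec_generate_alpha_labels; infer_instance

-- ===== CLAIM (what is proved, stated in full; the proofs are below) =====
def Claim_equal_generate_alpha_labels : Prop := ∀ (n : Int), Dom_generate_alpha_labels n → Pre_generate_alpha_labels n → Spec_generate_alpha_labels n (generate_alpha_labels n)

-- ===== LEMMAS AND PROOFS =====

-- the label Python A computes for index i
def pvLab (i : Int) : String :=
  if i < 26 then String.ofList [Char.ofNat (65 + i).toNat]
  else String.ofList [Char.ofNat (65 + (PySem.Int.floordiv i 26 - 1)).toNat] ++ String.ofList [Char.ofNat (65 + PySem.Int.mod i 26).toNat]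

theorem pvA_eq (n : Int) : generate_alpha_labels n = (PySem.List.pyRange 0 n 1).map pvLab := by
  unfold generate_alpha_labels
  have h : (fun (labels : List String) (i : Int) =>
      if i < 26 then labels ++ [String.ofList [Char.ofNat (65 + i).toNat]]
      else
        let first := String.ofList [Char.ofNat (65 + (PySem.Int.floordiv i 26 - 1)).toNat]
        let second := String.ofList [Char.ofNat (65 + PySem.Int.mod i 26).toNat]
        labels ++ [first ++ second])
      = fun (labels : List String) (i : Int) => labels ++ [pvLab i] := by
    funext labels i
    simp only [pvLab]
    split <;> rfl
  rw [h, PySem.List.foldl_append_singleton_eq_map]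
  simp

-- the pair label B builds at outer counter o, inner counter s is A's label for index 26*(o+1)+s
theorem pvLab_pair (o s : Int) (ho : 0 <= o) (hs0 : 0 <= s) (hs : s < 26) :
    pvLab (26 * (o + 1) + s) = String.ofList [Char.ofNat (65 + o).toNat] ++ String.ofList [Char.ofNat (65 + s).toNat] := by
  have hd : PySem.Int.floordiv (26 * (o + 1) + s) 26 = o + 1 := by
    rw [PySem.Int.floordiv_eq_iff_of_pos (by norm_num)]
    constructor <;> omega
  have hm : PySem.Int.mod (26 * (o + 1) + s) 26 = s := by
    rw [PySem.Int.mod_eq_emod_of_pos (by norm_num)]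
    omega
  unfold pvLab
  rw [if_neg (by omega), hd, hm]
  norm_num

theorem pvB_inner_spec (n o : Int) (ho : 0 <= o) :
    forall (k : Nat) (s : Int) (labels : List String) (total : Int), 0 <= s -> 26 - s = (k : Int) ->
    total = 26 * (o + 1) + s -> total < n ->
    pvB_inner n o (PySem.List.pyRange s 26 1) labels total
      = (labels ++ (PySem.List.pyRange total (min n (26 * (o + 2))) 1).map pvLab, min n (26 * (o + 2))) := by
  intro k
  induction k with
  | zero =>
      intro s labels total hs0 hk ht hn
      have hs : s = 26 := by omega
      subst hs
      have hmin : min n (26 * (o + 2)) = total := by omega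
      rw [hmin, PySem.List.pyRange_one_eq_nil le_rfl, PySem.List.pyRange_one_eq_nil le_rfl]
      simp [pvB_inner]
  | succ k ih =>
      intro s labels total hs0 hk ht hn
      have hs : s < 26 := by omega
      rw [PySem.List.pyRange_one_cons hs]
      simp only [pvB_inner]
      have hpair : String.ofList [Char.ofNat (65 + o).toNat] ++ String.ofList [Char.ofNat (65 + s).toNat] = pvLab total := by
        rw [ht]; exact (pvLab_pair o s ho hs0 hs).symm
      split
      · next h =>
          have hmin : min n (26 * (o + 2)) = n := by omega
          rw [hmin, ← h, PySem.List.pyRange_one_singleton]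
          simp [hpair]
      · next h =>
          rw [ih (s + 1) _ (total + 1) (by omega) (by omega) (by omega) (by omega)]
          have htm : total < min n (26 * (o + 2)) := by omega
          rw [PySem.List.pyRange_one_cons htm]
          simp [hpair]

theorem pvB_outer_spec (n o total : Int) (labels : List String)
    (ho : 0 <= o) (ht : total = 26 * (o + 1)) (hl : labels = (PySem.List.pyRange 0 total 1).map pvLab) :
    pvB_outer n labels total o = (PySem.List.pyRange 0 (max total n) 1).map pvLab := by
  rw [pvB_outer]
  split
  · next h =>
      have hin := pvB_inner_spec n o ho 26 0 labels total le_rfl (by norm_num) (by omega) h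
      simp only [hin]
      by_cases hc : 26 * (o + 2) <= n
      · have hlab' : labels ++ (PySem.List.pyRange total (min n (26 * (o + 2))) 1).map pvLab
            = (PySem.List.pyRange 0 (min n (26 * (o + 2))) 1).map pvLab := by
          rw [hl, ← List.map_append, ← PySem.List.pyRange_one_append 0 total (min n (26 * (o + 2))) (by omega) (by omega)]
        rw [pvB_outer_spec n (o + 1) (min n (26 * (o + 2))) _ (by omega) (by omega) hlab']
        have h1 : max (min n (26 * (o + 2))) n = n := by omega
        have h2 : max total n = n := by omega
        rw [h1, h2]
      · have hm2 : min n (26 * (o + 2)) = n := by omega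
        rw [pvB_outer]
        rw [if_neg (by omega)]
        rw [hl, ← List.map_append, ← PySem.List.pyRange_one_append 0 total (min n (26 * (o + 2))) (by omega) (by omega)]
        have h1 : min n (26 * (o + 2)) = max total n := by omega
        rw [h1]
  · next h =>
      rw [hl]
      have h1 : max total n = total := by omega
      rw [h1]
termination_by (n - total).toNat
decreasing_by omega


-- ===== VERDICT (by name: the statement is the Claim_ definition above) =====
theorem generate_alpha_labels_spec : Claim_equal_generate_alpha_labels := by
  intro n hdom hpre
  unfold Spec_generate_alpha_labels
  rw [pvA_eq]
  unfold generate_alpha_labels_alt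
  rcases lt_or_ge 26 n with hn | hn
  · -- n > 26
    rw [show min n 26 = 26 from by omega]
    show List.map pvLab (PySem.List.pyRange 0 n 1)
        = pvB_outer n ((PySem.List.pyRange 0 26 1).map (fun i => String.ofList [Char.ofNat (65 + i).toNat]))
            (((PySem.List.pyRange 0 26 1).map (fun i => String.ofList [Char.ofNat (65 + i).toNat])).length : Int) 0
    have hL : ((PySem.List.pyRange 0 26 1).map (fun i => String.ofList [Char.ofNat (65 + i).toNat]))
        = (PySem.List.pyRange 0 26 1).map pvLab := by
      apply List.map_congr_left
      intro i hi
      rw [PySem.List.mem_pyRange_one] at hi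
      simp [pvLab, if_pos (by omega : i < 26)]
    have hlen : (((PySem.List.pyRange 0 26 1).map (fun i => String.ofList [Char.ofNat (65 + i).toNat])).length : Int) = 26 := by
      simp [PySem.List.length_pyRange_one]
    rw [hlen, hL, pvB_outer_spec n 0 26 _ le_rfl (by norm_num) rfl]
    rw [show max (26:Int) n = n from by omega]
  · rcases lt_or_ge 0 n with h0 | h0
    · -- 0 < n <= 26
      rw [show min n 26 = n from by omega]
      show List.map pvLab (PySem.List.pyRange 0 n 1)
          = pvB_outer n ((PySem.List.pyRange 0 n 1).map (fun i => String.ofList [Char.ofNat (65 + i).toNat]))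
              (((PySem.List.pyRange 0 n 1).map (fun i => String.ofList [Char.ofNat (65 + i).toNat])).length : Int) 0
      have hlen : (((PySem.List.pyRange 0 n 1).map (fun i => String.ofList [Char.ofNat (65 + i).toNat])).length : Int) = n := by
        simp [PySem.List.length_pyRange_one]
        omega
      rw [hlen, pvB_outer, if_neg (by omega)]
      apply List.map_congr_left
      intro i hi
      rw [PySem.List.mem_pyRange_one] at hi
      simp [pvLab, if_pos (by omega : i < 26)]
    · -- n <= 0
      rw [show min n 26 = n from by omega]
      rw [PySem.List.pyRange_one_eq_nil (by omega : n <= (0:Int))]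
      show List.map pvLab ([] : List Int)
          = pvB_outer n (([] : List Int).map (fun i => String.ofList [Char.ofNat (65 + i).toNat]))
              ((([] : List Int).map (fun i => String.ofList [Char.ofNat (65 + i).toNat])).length : Int) 0
      rw [pvB_outer, if_neg (by simp; omega)]
      simp
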